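-- pv_equiv track=rewrite | github.com/DNYoussef/connascence-safety-analyzer | analyzer/theater_detection/validator.py | _check_duplicate_evidence
-- ===== SOURCE A (Python) =====
-- from typing import Any, Dict, List, Tuple
--
-- def _check_duplicate_evidence(evidence_files: List[Dict]) -> bool:
--     """Check for duplicate evidence across files"""
--     hashes = set()
--     for file_data in evidence_files:
--         if "content_hash" in file_data:
--             if file_data["content_hash"] in hashes:
--                 return True
--             hashes.add(file_data["content_hash"])
--     return False
-- ===== SOURCE B (Python) =====
-- from typing import Any, Dict, List, Tuple
--
-- def _check_duplicate_evidence(evidence_files: List[Dict]) -> bool: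
--     """Check for duplicate evidence across files"""
--     hashes = sorted(fd["content_hash"] for fd in evidence_files if "content_hash" in fd)
--     return any(x == y for x, y in zip(hashes, hashes[1:]))
-- ===== Notes on version B (the rewrite author's own statement) =====
-- stated objective: alternative
-- what changed: Replaced the hashing seen-set with a sort-based duplicate check: collect all present content_hash values, sort them, and report a duplicate iff some adjacent sorted pair is equal.
import Mathlib
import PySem

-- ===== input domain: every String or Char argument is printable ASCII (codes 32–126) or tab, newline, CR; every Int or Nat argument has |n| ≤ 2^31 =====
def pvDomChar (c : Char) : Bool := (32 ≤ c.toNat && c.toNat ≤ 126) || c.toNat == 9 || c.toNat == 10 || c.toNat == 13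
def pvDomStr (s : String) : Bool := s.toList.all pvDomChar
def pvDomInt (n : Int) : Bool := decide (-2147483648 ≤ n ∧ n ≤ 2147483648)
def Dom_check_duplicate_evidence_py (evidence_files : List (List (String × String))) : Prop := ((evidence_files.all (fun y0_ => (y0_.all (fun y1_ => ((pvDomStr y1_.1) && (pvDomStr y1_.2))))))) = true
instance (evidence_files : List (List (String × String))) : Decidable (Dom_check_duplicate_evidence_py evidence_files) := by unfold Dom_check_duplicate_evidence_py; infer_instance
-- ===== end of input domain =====

-- B replaces A's hash-set early-exit loop with a sort-based check: collect all present
-- content_hash values, sort them, and report a duplicate iff some adjacent sorted pair is equal.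


-- ===== PORT A =====
-- dict lookup on the association list: first match ('"content_hash" in fd' + 'fd["content_hash"]')
def pvHashOf (fd : List (String × String)) : Option String :=
  (fd.find? (fun p => p.1 == "content_hash")).map Prod.snd

-- A's loop: walk the files keeping the 'hashes' set, return True on the first repeat
def pvCheckLoop : List (List (String × String)) → PySem.Set String → Bool
  | [], _ => false
  | fd :: rest, hashes =>
    match pvHashOf fd with
    | none => pvCheckLoop rest hashes
    | some h =>
      if PySem.Set.contains hashes h then true
      else pvCheckLoop rest (PySem.Set.add hashes h)

def check_duplicate_evidence_py (evidence_files : List (List (String × String))) : Bool :=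
  pvCheckLoop evidence_files PySem.Set.empty

-- ===== PORT B =====
-- sorted(fd["content_hash"] for fd in evidence_files if "content_hash" in fd),
-- then any(x == y for x, y in zip(hashes, hashes[1:]))
def check_duplicate_evidence_py_alt (evidence_files : List (List (String × String))) : Bool :=
  let hashes := PySem.List.sorted (evidence_files.filterMap pvHashOf) (fun x => x) false
  (hashes.zip (hashes.drop 1)).any (fun p => p.1 == p.2)

-- ===== PRECONDITION & SPEC =====
def Spec_check_duplicate_evidence_py (evidence_files : List (List (String × String))) (out : Bool) : Prop := out = check_duplicate_evidence_py_alt evidence_files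
instance (evidence_files : List (List (String × String))) (out : Bool) : Decidable (Spec_check_duplicate_evidence_py evidence_files out) := by unfold Spec_check_duplicate_evidence_py; infer_instance

-- ===== CLAIM (what is proved, stated in full; the proofs are below) =====
def Claim_equal_check_duplicate_evidence_py : Prop := ∀ (evidence_files : List (List (String × String))), Dom_check_duplicate_evidence_py evidence_files → Spec_check_duplicate_evidence_py evidence_files (check_duplicate_evidence_py evidence_files)

-- ===== LEMMAS AND PROOFS =====

-- A's loop returns true iff the list of present hashes has a repeat
theorem pv_loop_eq (l : List (List (String × String))) : ∀ (s : PySem.Set String), s.Nodup →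
    pvCheckLoop l s = !decide ((s ++ l.filterMap pvHashOf).Nodup) := by
  induction l with
  | nil => intro s hs; simp [pvCheckLoop, hs]
  | cons fd rest ih =>
    intro s hs
    cases hfd : pvHashOf fd with
    | none => simp only [pvCheckLoop, List.filterMap_cons, hfd]; exact ih s hs
    | some h =>
      simp only [pvCheckLoop, List.filterMap_cons, hfd]
      by_cases hmem : h ∈ s
      · have : PySem.Set.contains s h = true := by
          simp [PySem.Set.contains]; exact hmem
        rw [this]
        simp only [if_true]
        have : ¬ (s ++ h :: rest.filterMap pvHashOf).Nodup := by
          intro hnd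
          exact absurd (List.Nodup.disjoint hnd hmem (by simp)) (by simp)
        simp [this]
      · have hc : PySem.Set.contains s h = false := by
          simp [PySem.Set.contains]; exact hmem
        rw [hc]
        simp only [Bool.false_eq_true, if_false]
        rw [PySem.Set.add_of_not_mem hmem] at *
        rw [ih (s ++ [h]) (by simp [List.nodup_append, hs]; intro a ha he; exact hmem (he ▸ ha))]
        simp [List.append_assoc]

-- B's adjacent scan, written as structural recursion
def pvAdjDup : List String → Bool
  | [] => false
  | [_] => false
  | x :: y :: t => (x == y) || pvAdjDup (y :: t)

theorem pv_zip_eq_adjDup : ∀ (l : List String),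
    (l.zip (l.drop 1)).any (fun p => p.1 == p.2) = pvAdjDup l := by
  intro l
  induction l with
  | nil => rfl
  | cons x t ih =>
    cases t with
    | nil => rfl
    | cons y t' => simp [pvAdjDup, ← ih]

-- on a ≤-sorted list, an adjacent repeat is exactly a repeat
theorem pv_adjDup_sorted : ∀ (l : List String), l.Pairwise (· ≤ ·) →
    (pvAdjDup l = !decide l.Nodup) := by
  intro l
  induction l with
  | nil => intro _; simp [pvAdjDup]
  | cons x t ih =>
    intro hp
    cases t with
    | nil => simp [pvAdjDup]
    | cons y t' =>
      have hp' : (y :: t').Pairwise (· ≤ ·) := hp.tail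
      have hxy : x ≤ y := (List.pairwise_cons.mp hp).1 y (by simp)
      by_cases hxy_eq : x = y
      · subst hxy_eq
        simp [pvAdjDup, List.nodup_cons]
      · have hlt : x < y := lt_of_le_of_ne hxy hxy_eq
        have hxnot : x ∉ y :: t' := by
          intro hmem
          rcases List.mem_cons.mp hmem with h | h
          · exact hxy_eq h
          · have hyx : y ≤ x := (List.pairwise_cons.mp hp').1 x h
            exact absurd (lt_of_lt_of_le hlt hyx) (lt_irrefl x)
        have hnd : (x :: y :: t').Nodup ↔ (y :: t').Nodup := by
          constructor
          · exact fun h => h.tail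
          · intro h; exact List.nodup_cons.mpr ⟨hxnot, h⟩
        simp only [pvAdjDup]
        rw [ih hp']
        by_cases hnd' : (y :: t').Nodup
        · simp [hnd', hnd.mpr hnd', hxy_eq]
        · have : ¬ (x :: y :: t').Nodup := fun h => hnd' (hnd.mp h)
          simp [hnd', this]

-- ===== VERDICT (by name: the statement is the Claim_ definition above) =====
theorem check_duplicate_evidence_py_spec : Claim_equal_check_duplicate_evidence_py := by
  intro efs _
  unfold Spec_check_duplicate_evidence_py check_duplicate_evidence_py check_duplicate_evidence_py_alt
  rw [pv_loop_eq efs PySem.Set.empty (by simp [PySem.Set.empty])]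
  set hs := efs.filterMap pvHashOf with hhs
  rw [pv_zip_eq_adjDup, pv_adjDup_sorted _ (PySem.List.sorted_pairwise hs (fun x => x))]
  have hperm : (PySem.List.sorted hs (fun x => x) false).Perm hs := PySem.List.sorted_perm hs _ _
  simp [PySem.Set.empty, hperm.nodup_iff]
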